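-- pv_equiv track=rewrite | github.com/DenBugNBA/YandexAlgorithmsTrainings | 5_lesson (1.0)/9_robot.py | count_valid_ways
-- ===== SOURCE A (Python) =====
-- def count_valid_ways(operations, k):
--     valid_ways_count = 0
--
--     current_series = 0
--     for i in range(k, len(operations)):
--         if operations[i] == operations[i - k]:
--             current_series += 1
--             valid_ways_count += current_series
--         else:
--             current_series = 0
--
--     return valid_ways_count
-- ===== SOURCE B (Python) =====
-- def count_valid_ways(operations, k):
--     n = len(operations)
--     total = 0
--     for a in range(k, n):
--         b = a
--         while b < n and operations[b] == operations[b - k]: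
--             total += 1
--             b += 1
--     return total
-- ===== Notes on version B (the rewrite author's own statement) =====
-- stated objective: alternative
-- what changed: B drops A's running-series accumulator entirely and instead enumerates every valid interval directly: for each start index it scans forward while the k-shifted match holds, counting each extension (nested-loop interval enumeration instead of a one-pass DP).
import Mathlib
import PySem

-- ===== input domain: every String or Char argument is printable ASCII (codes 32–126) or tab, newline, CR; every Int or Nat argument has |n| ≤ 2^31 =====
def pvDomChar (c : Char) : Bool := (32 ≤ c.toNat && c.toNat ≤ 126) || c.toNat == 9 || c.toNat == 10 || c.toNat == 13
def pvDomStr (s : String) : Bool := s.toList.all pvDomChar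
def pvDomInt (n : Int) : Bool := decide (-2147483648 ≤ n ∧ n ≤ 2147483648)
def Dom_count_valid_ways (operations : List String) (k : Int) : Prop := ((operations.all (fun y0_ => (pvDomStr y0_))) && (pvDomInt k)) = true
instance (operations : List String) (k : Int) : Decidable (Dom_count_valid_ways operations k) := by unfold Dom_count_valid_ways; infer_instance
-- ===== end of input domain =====

-- B replaces A's one-pass running-series accumulation by direct enumeration of all valid
-- intervals: for each start it scans forward while the k-shifted match holds (objective: alternative).

-- ===== PORT A =====
-- valid_ways_count is st.1, current_series is st.2; operations[i] uses pyGetD, which agrees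
-- with Python's indexing on all indices reached under Pre_ (0 ≤ k, or the empty list).
def count_valid_ways (operations : List String) (k : Int) : Int :=
  (((PySem.List.pyRange k operations.length 1).foldl
    (fun (st : Int × Int) (i : Int) =>
      if PySem.List.pyGetD operations i "" = PySem.List.pyGetD operations (i - k) "" then
        (st.1 + (st.2 + 1), st.2 + 1)
      else (st.1, 0)) (0, 0))).1

-- ===== PORT B =====
-- inner `while b < n and operations[b] == operations[b-k]: total += 1; b += 1` — the forward
-- scan from start b, returning how many extensions it counts.
def cvw_scan (operations : List String) (k : Int) (b : Int) : Int :=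
  if h : b < (operations.length : Int) ∧
      PySem.List.pyGetD operations b "" = PySem.List.pyGetD operations (b - k) "" then
    1 + cvw_scan operations k (b + 1)
  else 0
termination_by ((operations.length : Int) - b).toNat
decreasing_by omega

-- outer `for a in range(k, n): total += <scan from a>`
def count_valid_ways_alt (operations : List String) (k : Int) : Int :=
  (PySem.List.pyRange k operations.length 1).foldl
    (fun (total : Int) (a : Int) => total + cvw_scan operations k a) 0

-- ===== PRECONDITION & SPEC =====
-- Pre_ excludes k < 0, where Python A raises IndexError (the shifted index i - k, or a
-- negative i on a short list, runs out of range); B's Python raises there too.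
def Pre_count_valid_ways (operations : List String) (k : Int) : Prop :=
  0 ≤ k
instance (operations : List String) (k : Int) : Decidable (Pre_count_valid_ways operations k) := by
  unfold Pre_count_valid_ways; infer_instance
def pvWitness_count_valid_ways : List String × Int := (["a", "b", "a", "a"], 2)
def Spec_count_valid_ways (operations : List String) (k : Int) (out : Int) : Prop := out = count_valid_ways_alt operations k
instance (operations : List String) (k : Int) (out : Int) : Decidable (Spec_count_valid_ways operations k out) := by unfold Spec_count_valid_ways; infer_instance

-- ===== CLAIM (what is proved, stated in full; the proofs are below) =====
def Claim_equal_count_valid_ways : Prop := ∀ (operations : List String) (k : Int), Dom_count_valid_ways operations k → Pre_count_valid_ways operations k → Spec_count_valid_ways operations k (count_valid_ways operations k)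

-- ===== LEMMAS AND PROOFS =====

-- Loop invariant: entering A's loop at position a with state (t, c), the final count equals
-- B's fold over the remaining range started at t + c * (scan a): the running series c still
-- contributes once for each of the (scan a) consecutive matches ahead of a.
theorem cvw_key (operations : List String) (k : Int) :
    ∀ (d : Nat) (a t c : Int), ((operations.length : Int) - a).toNat = d →
      ((PySem.List.pyRange a operations.length 1).foldl
        (fun (st : Int × Int) (i : Int) =>
          if PySem.List.pyGetD operations i "" = PySem.List.pyGetD operations (i - k) "" then
            (st.1 + (st.2 + 1), st.2 + 1)
          else (st.1, 0)) (t, c)).1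
      = (PySem.List.pyRange a operations.length 1).foldl
          (fun (total : Int) (i : Int) => total + cvw_scan operations k i)
          (t + c * cvw_scan operations k a) := by
  intro d
  induction d with
  | zero =>
    intro a t c hd
    have hna : (operations.length : Int) ≤ a := by omega
    rw [PySem.List.pyRange_one_eq_nil hna]
    have hs : cvw_scan operations k a = 0 := by
      rw [cvw_scan]; rw [dif_neg]; intro h; omega
    simp [hs]
  | succ d ih =>
    intro a t c hd
    have han : a < (operations.length : Int) := by omega
    rw [PySem.List.pyRange_one_cons han]
    simp only [List.foldl_cons]
    by_cases hp : PySem.List.pyGetD operations a "" = PySem.List.pyGetD operations (a - k) ""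
    · rw [if_pos hp]
      have hsa : cvw_scan operations k a = 1 + cvw_scan operations k (a + 1) := by
        rw [cvw_scan]; rw [dif_pos ⟨han, hp⟩]
      have := ih (a + 1) (t + (c + 1)) (c + 1) (by omega)
      simp only at this
      rw [this, hsa]; ring_nf
    · rw [if_neg hp]
      have hsa : cvw_scan operations k a = 0 := by
        rw [cvw_scan]; rw [dif_neg]; intro h; exact hp h.2
      have := ih (a + 1) t 0 (by omega)
      simp only at this
      rw [this, hsa]
      have h0 : cvw_scan operations k (a + 1) * (0:Int) = 0 := by ring
      ring_nf

-- ===== VERDICT (by name: the statement is the Claim_ definition above) =====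
theorem count_valid_ways_spec : Claim_equal_count_valid_ways := by
  intro operations k _ _
  unfold Spec_count_valid_ways count_valid_ways count_valid_ways_alt
  have h := cvw_key operations k ((operations.length : Int) - k).toNat k 0 0 rfl
  simpa using h
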